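-- pv_equiv track=rewrite | github.com/RomanRetsen/code_clash | a_dp2_lab8_2.py | product_score_for_byte
-- ===== SOURCE A (Python) =====
-- def product_score_for_byte(pos, bt, strm, k_size):
--     cntr = 0
--     for i in range(pos, len(strm), k_size):
--         xor_byte = bt ^ strm[i]
--         if (xor_byte >= 65 and xor_byte <= 90) \
--                 or (xor_byte >= 95 and xor_byte <= 122) \
--                 or (xor_byte) == 32:
--             cntr += 1
--     return cntr
-- ===== SOURCE B (Python) =====
-- def product_score_for_byte(pos, bt, strm, k_size):
--     allowed = {bt ^ c for c in list(range(65, 91)) + list(range(95, 123)) + [32]}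
--     freq = {}
--     for i in range(pos, len(strm), k_size):
--         v = strm[i]
--         freq[v] = freq.get(v, 0) + 1
--     return sum(freq.get(v, 0) for v in allowed)
-- ===== Notes on version B (the rewrite author's own statement) =====
-- stated objective: alternative
-- what changed: B precomputes the 53-element target set {bt^c : c allowed} once, tabulates the strided bytes into a histogram dict, and returns the sum of histogram counts over the fixed target set, instead of range-testing the XOR of every strided byte inside the loop.
import Mathlib
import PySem

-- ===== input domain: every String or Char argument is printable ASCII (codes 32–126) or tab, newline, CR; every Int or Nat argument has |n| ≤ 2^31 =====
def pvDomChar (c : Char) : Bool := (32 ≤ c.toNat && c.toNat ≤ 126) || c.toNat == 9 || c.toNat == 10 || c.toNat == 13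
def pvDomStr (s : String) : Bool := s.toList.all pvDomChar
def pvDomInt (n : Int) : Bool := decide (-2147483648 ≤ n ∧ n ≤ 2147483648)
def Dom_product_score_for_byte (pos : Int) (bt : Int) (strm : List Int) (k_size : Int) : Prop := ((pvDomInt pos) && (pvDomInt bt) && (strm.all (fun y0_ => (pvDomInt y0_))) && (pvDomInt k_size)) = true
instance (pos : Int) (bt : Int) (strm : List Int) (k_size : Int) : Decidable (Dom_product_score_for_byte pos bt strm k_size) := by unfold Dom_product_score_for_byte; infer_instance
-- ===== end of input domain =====

-- B replaces the per-element double range test of the XORed byte by a precomputed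
-- 53-element target set and a histogram of the strided bytes (alternative decomposition;
-- same asymptotic cost).

-- ===== PORT A =====
def product_score_for_byte (pos : Int) (bt : Int) (strm : List Int) (k_size : Int) : Int :=
  (PySem.List.pyRange pos strm.length k_size).foldl
    (fun cntr i =>
      let xor_byte := PySem.Int.bxor bt (PySem.List.pyGetD strm i 0)
      if (xor_byte ≥ 65 ∧ xor_byte ≤ 90) ∨ (xor_byte ≥ 95 ∧ xor_byte ≤ 122) ∨ xor_byte = 32
      then cntr + 1 else cntr) 0

-- ===== PORT B =====
-- B's local 'allowed = {bt ^ c for c in list(range(65,91)) + list(range(95,123)) + [32]}'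
def psfb_allowed (bt : Int) : PySem.Set Int :=
  PySem.Set.ofList
    ((PySem.List.pyRange 65 91 1 ++ PySem.List.pyRange 95 123 1 ++ [32]).map
      (fun c => PySem.Int.bxor bt c))

-- B's histogram loop: 'freq[v] = freq.get(v, 0) + 1' over i in range(pos, len(strm), k_size)
def psfb_freq (pos : Int) (strm : List Int) (k_size : Int) : PySem.Dict Int Int :=
  (PySem.List.pyRange pos strm.length k_size).foldl
    (fun d i =>
      let v := PySem.List.pyGetD strm i 0
      d.insert v (d.getD v 0 + 1)) PySem.Dict.empty

def product_score_for_byte_alt (pos : Int) (bt : Int) (strm : List Int) (k_size : Int) : Int :=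
  (psfb_allowed bt).foldl (fun s v => s + (psfb_freq pos strm k_size).getD v 0) 0

-- ===== PRECONDITION & SPEC =====
-- Pre_ excludes exactly the inputs on which the Python A raises: k_size = 0 (ValueError
-- from range) and stride starts whose first index is out of range (IndexError:
-- pos < -len(strm) with a positive step, pos > len(strm) with a negative step).
def Pre_product_score_for_byte (pos : Int) (bt : Int) (strm : List Int) (k_size : Int) : Prop :=
  (1 ≤ k_size ∧ -(strm.length : Int) ≤ pos) ∨ (k_size ≤ -1 ∧ pos ≤ (strm.length : Int))
instance (pos : Int) (bt : Int) (strm : List Int) (k_size : Int) : Decidable (Pre_product_score_for_byte pos bt strm k_size) := by unfold Pre_product_score_for_byte; infer_instance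
def pvWitness_product_score_for_byte : Int × Int × List Int × Int := (0, 77, [12, 45, 77, 32, 109], 2)

def Spec_product_score_for_byte (pos : Int) (bt : Int) (strm : List Int) (k_size : Int) (out : Int) : Prop := out = product_score_for_byte_alt pos bt strm k_size
instance (pos : Int) (bt : Int) (strm : List Int) (k_size : Int) (out : Int) : Decidable (Spec_product_score_for_byte pos bt strm k_size out) := by unfold Spec_product_score_for_byte; infer_instance

-- ===== CLAIM (what is proved, stated in full; the proofs are below) =====
def Claim_equal_product_score_for_byte : Prop := ∀ (pos : Int) (bt : Int) (strm : List Int) (k_size : Int), Dom_product_score_for_byte pos bt strm k_size → Pre_product_score_for_byte pos bt strm k_size → Spec_product_score_for_byte pos bt strm k_size (product_score_for_byte pos bt strm k_size)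

-- ===== LEMMAS AND PROOFS =====

-- Python's ^ is an involution: bt ^ (bt ^ c) = c.
theorem bxor_cancel (a b : Int) : PySem.Int.bxor a (PySem.Int.bxor a b) = b := by
  have hx : ∀ m n : Nat, m ^^^ (m ^^^ n) = n := fun m n => by
    rw [← Nat.xor_assoc, Nat.xor_self, Nat.zero_xor]
  unfold PySem.Int.bxor
  by_cases ha : 0 ≤ a <;> by_cases hb : 0 ≤ b <;> simp only [ha, hb, if_false, if_pos]
  · rw [if_pos (by positivity), Int.toNat_natCast, hx, Int.toNat_of_nonneg hb]
  · rw [show (-(-(↑(a.toNat ^^^ (-b - 1).toNat) : Int) - 1) - 1).toNat = a.toNat ^^^ (-b - 1).toNat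
        from by omega, hx]
    omega
  · rw [show (-(-(↑((-a - 1).toNat ^^^ b.toNat) : Int) - 1) - 1).toNat = (-a - 1).toNat ^^^ b.toNat
        from by omega, hx]
    omega
  · rw [if_pos (by positivity), Int.toNat_natCast, hx]
    omega

-- Sum of an indicator over a duplicate-free list is a membership test.
theorem sum_indicator_nodup (x : Int) : ∀ (S : List Int), S.Nodup →
    (S.map (fun v => if v = x then (1 : Int) else 0)).sum = if x ∈ S then 1 else 0 := by
  intro S hS
  induction S with
  | nil => simp
  | cons v S' ih =>
    rcases List.nodup_cons.mp hS with ⟨hv, hS'⟩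
    by_cases h : v = x
    · subst h
      simp [List.mem_cons, hv, ih hS']
    · have hxv : ¬ x = v := fun hxv => h hxv.symm
      simp only [List.map_cons, List.sum_cons, if_neg h, zero_add, ih hS', List.mem_cons]
      simp [hxv]

-- Summing per-value counts of a list over a duplicate-free value set S
-- counts exactly the elements of the list that lie in S.
theorem sum_count_eq_countP (S : List Int) (hS : S.Nodup) : ∀ (L : List Int),
    (S.map (fun v => (L.count v : Int))).sum = (L.countP (fun x => decide (x ∈ S)) : Int) := by
  intro L
  induction L with
  | nil => simp
  | cons x L ih =>
    have hcount : ∀ v : Int, ((x :: L).count v : Int) = (L.count v : Int) + (if v = x then 1 else 0) := by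
      intro v
      by_cases hvx : v = x
      · subst hvx
        simp [List.count_cons]
      · have hb : (v == x) = false := beq_false_of_ne hvx
        simp [List.count_cons, hb, hvx]
        exact fun hxv => hvx hxv.symm
    have hmapsum :
        (S.map (fun v => ((x :: L).count v : Int))).sum
          = (S.map (fun v => (L.count v : Int))).sum
            + (S.map (fun v => if v = x then (1 : Int) else 0)).sum := by
      rw [← List.sum_map_add]
      exact congrArg List.sum (List.map_congr_left (fun v _ => hcount v))
    rw [hmapsum, ih, sum_indicator_nodup x S hS, List.countP_cons]
    by_cases hx : x ∈ S <;> simp [hx]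

theorem psfb_allowed_nodup (bt : Int) : (psfb_allowed bt).Nodup := by
  unfold psfb_allowed
  exact PySem.Set.nodup_ofList _

-- The precomputed target set membership is exactly A's range test on the XORed byte.
theorem mem_allowed_iff (bt : Int) : ∀ x : Int,
    x ∈ psfb_allowed bt
      ↔ ((PySem.Int.bxor bt x ≥ 65 ∧ PySem.Int.bxor bt x ≤ 90)
          ∨ (PySem.Int.bxor bt x ≥ 95 ∧ PySem.Int.bxor bt x ≤ 122) ∨ PySem.Int.bxor bt x = 32) := by
  intro x
  unfold psfb_allowed
  rw [PySem.Set.mem_ofList, List.mem_map]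
  constructor
  · rintro ⟨c, hc, rfl⟩
    rw [bxor_cancel]
    simp only [List.mem_append, PySem.List.mem_pyRange_one, List.mem_singleton] at hc
    omega
  · intro h
    refine ⟨PySem.Int.bxor bt x, ?_, bxor_cancel bt x⟩
    simp only [List.mem_append, PySem.List.mem_pyRange_one, List.mem_singleton]
    omega

-- A's counting loop, characterised: it counts the strided values lying in any set S
-- whose membership is A's range test of the XORed byte.
theorem foldl_cnt (bt : Int) (strm : List Int) (S : List Int)
    (hmem : ∀ x : Int, x ∈ S
      ↔ ((PySem.Int.bxor bt x ≥ 65 ∧ PySem.Int.bxor bt x ≤ 90)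
          ∨ (PySem.Int.bxor bt x ≥ 95 ∧ PySem.Int.bxor bt x ≤ 122) ∨ PySem.Int.bxor bt x = 32)) :
    ∀ (idxs : List Int) (c : Int),
    idxs.foldl
      (fun cntr i =>
        let xor_byte := PySem.Int.bxor bt (PySem.List.pyGetD strm i 0)
        if (xor_byte ≥ 65 ∧ xor_byte ≤ 90) ∨ (xor_byte ≥ 95 ∧ xor_byte ≤ 122) ∨ xor_byte = 32
        then cntr + 1 else cntr) c
      = c + ((idxs.map (fun i => PySem.List.pyGetD strm i 0)).countP
              (fun x => decide (x ∈ S)) : Int) := by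
  intro idxs
  induction idxs with
  | nil => intro c; simp
  | cons i t ih =>
    intro c
    rw [List.foldl_cons, List.map_cons, List.countP_cons]
    by_cases h : PySem.List.pyGetD strm i 0 ∈ S
    · have hp := (hmem _).mp h
      simp only [ih, hp, if_pos, h, decide_true, if_true]
      push_cast
      ring
    · have hp : ¬ ((PySem.Int.bxor bt (PySem.List.pyGetD strm i 0) ≥ 65 ∧ PySem.Int.bxor bt (PySem.List.pyGetD strm i 0) ≤ 90)
          ∨ (PySem.Int.bxor bt (PySem.List.pyGetD strm i 0) ≥ 95 ∧ PySem.Int.bxor bt (PySem.List.pyGetD strm i 0) ≤ 122)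
          ∨ PySem.Int.bxor bt (PySem.List.pyGetD strm i 0) = 32) := fun hc => h ((hmem _).mpr hc)
      simp only [ih, hp, if_neg, h, decide_false, if_false]
      push_cast
      ring

-- B's histogram loop is exactly Counter of the strided values.
theorem psfb_freq_eq_counter (pos : Int) (strm : List Int) (k_size : Int) :
    psfb_freq pos strm k_size
      = PySem.Dict.counter ((PySem.List.pyRange pos strm.length k_size).map
          (fun i => PySem.List.pyGetD strm i 0)) := by
  unfold psfb_freq
  rw [← PySem.Dict.foldl_insert_getD_add_one_eq_counter, List.foldl_map]

-- B's final pass sums the histogram over the target set.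
theorem foldl_sum (L : List Int) : ∀ (S : List Int) (s : Int),
    S.foldl (fun s v => s + (PySem.Dict.counter L).getD v 0) s
      = s + (S.map (fun v => (L.count v : Int))).sum := by
  intro S
  induction S with
  | nil => intro s; simp
  | cons v t ih =>
    intro s
    rw [List.foldl_cons, ih, PySem.Dict.getD_counter, List.map_cons, List.sum_cons]
    ring

-- Core identity: both ports compute the same value on EVERY input
-- (outside Pre_ the shared total primitives make them agree as well).
theorem ports_agree (pos : Int) (bt : Int) (strm : List Int) (k_size : Int) :
    product_score_for_byte pos bt strm k_size = product_score_for_byte_alt pos bt strm k_size := by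
  unfold product_score_for_byte product_score_for_byte_alt
  rw [foldl_cnt bt strm (psfb_allowed bt) (mem_allowed_iff bt),
      psfb_freq_eq_counter pos strm k_size,
      foldl_sum _ (psfb_allowed bt) 0,
      sum_count_eq_countP (psfb_allowed bt) (psfb_allowed_nodup bt)]

-- ===== VERDICT (by name: the statement is the Claim_ definition above) =====
theorem product_score_for_byte_spec : Claim_equal_product_score_for_byte := by
  intro pos bt strm k_size _ _
  unfold Spec_product_score_for_byte
  exact ports_agree pos bt strm k_size
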